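-- pv_equiv track=rewrite | github.com/iamwillbar/ha-blueprints | .github/scripts/process_blueprints.py | calculate_semver
-- ===== SOURCE A (Python) =====
-- def calculate_semver(commits, filepath):
--     """Calculate semantic version based on commit messages"""
--     # Start with version 1.0.0
--     major = 1
--     minor = 0
--     patch = 0
--
--     # If no commits, return initial version
--     if not commits or len([c for c in commits if c.strip()]) == 0:
--         return '1.0.0'
--
--     # Process commits from oldest to newest (reverse the list)
--     is_first_commit = True
--     for commit in reversed(commits):
--         if not commit.strip():
--             continue
--
--         # Skip incrementing for the first commit - it establishes the base version 1.0.0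
--         if is_first_commit:
--             is_first_commit = False
--             continue
--
--         commit_msg = commit.split(' ', 1)[1] if ' ' in commit else commit
--         commit_lower = commit_msg.lower()
--
--         # Major version indicators
--         major_keywords = ['breaking change', 'breaking:', 'major:', '!:', 'incompatible']
--         minor_keywords = ['feat:', 'feature:', 'add:', 'new:', 'minor:', 'enhancement']
--
--         if any(keyword in commit_lower for keyword in major_keywords):
--             # Major: increment major, reset minor and patch to 0
--             major += 1
--             minor = 0
--             patch = 0
--         elif any(keyword in commit_lower for keyword in minor_keywords):
--             # Minor: increment minor, reset patch to 0
--             minor += 1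
--             patch = 0
--         else:
--             # All other commits (including patch keywords and unmatched): increment patch
--             patch += 1
--
--     return f"{major}.{minor}.{patch}"
-- ===== SOURCE B (Python) =====
-- def calculate_semver(commits, filepath):
--     """Classify relevant commits once, then derive each version field by
--     counting tags in suffixes (after the last major / last major-or-minor)."""
--     MAJOR = ['breaking change', 'breaking:', 'major:', '!:', 'incompatible']
--     MINOR = ['feat:', 'feature:', 'add:', 'new:', 'minor:', 'enhancement']
--
--     def classify(commit):
--         msg = commit.split(' ', 1)[1] if ' ' in commit else commit
--         low = msg.lower()
--         if any(k in low for k in MAJOR):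
--             return 'M'
--         if any(k in low for k in MINOR):
--             return 'm'
--         return 'p'
--
--     def after_last(tags, tag):
--         out = []
--         for t in reversed(tags):
--             if t == tag:
--                 break
--             out.append(t)
--         out.reverse()
--         return out
--
--     rel = [c for c in reversed(commits) if c.strip()]
--     if not rel:
--         return '1.0.0'
--     cats = [classify(c) for c in rel[1:]]
--     major = 1 + cats.count('M')
--     am = after_last(cats, 'M')
--     minor = am.count('m')
--     ap = after_last(am, 'm')
--     patch = ap.count('p')
--     return f"{major}.{minor}.{patch}"
-- ===== Notes on version B (the rewrite author's own statement) =====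
-- stated objective: alternative
-- what changed: Replaces A's sequential reset-fold over (major, minor, patch) with a one-shot classification of the relevant commits into M/m/p tags followed by suffix counting: major = 1 + count of M, minor = count of m after the last M, patch = count of p after the last major-or-minor tag.
import Mathlib
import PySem

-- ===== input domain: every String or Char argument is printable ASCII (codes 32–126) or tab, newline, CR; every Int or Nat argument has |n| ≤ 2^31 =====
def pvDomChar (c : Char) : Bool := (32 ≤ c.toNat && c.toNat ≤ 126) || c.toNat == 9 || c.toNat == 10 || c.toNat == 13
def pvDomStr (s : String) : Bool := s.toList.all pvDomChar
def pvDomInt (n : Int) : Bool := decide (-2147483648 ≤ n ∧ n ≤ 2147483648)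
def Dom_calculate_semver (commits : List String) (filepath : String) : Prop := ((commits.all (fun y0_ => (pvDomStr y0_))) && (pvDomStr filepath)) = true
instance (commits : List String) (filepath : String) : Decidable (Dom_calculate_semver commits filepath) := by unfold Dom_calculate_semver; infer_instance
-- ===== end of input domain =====

-- B replaces A's sequential reset-fold by a one-shot classification of the relevant
-- commits followed by suffix counting (simpler decomposition, same cost).

-- ===== PORT A =====
-- shared keyword constants (Python A writes the same literals inside the loop)
def svMajorKeywords : List String :=
  ["breaking change", "breaking:", "major:", "!:", "incompatible"]
def svMinorKeywords : List String :=
  ["feat:", "feature:", "add:", "new:", "minor:", "enhancement"]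

-- commit.split(' ', 1)[1] if ' ' in commit else commit  (the [1] is guarded by ' ' in commit)
def svMsg (commit : String) : String :=
  if PySem.Str.isIn " " commit then
    ((PySem.Str.splitMax? commit " " 1).getD []).getD 1 commit
  else commit

-- f"{major}.{minor}.{patch}"  (shared formatting of the three fields)
def svFormat (major minor patch : Int) : String :=
  String.ofList (PySem.Int.toChars major ++ '.' :: PySem.Int.toChars minor ++ '.' :: PySem.Int.toChars patch)

-- the loop body of A, state (major, minor, patch, is_first_commit)
-- commit_lower = commit_msg.lower()
def svLow (commit : String) : String := PySem.Str.lower (svMsg commit)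

def svStepA (st : Int × Int × Int × Bool) (commit : String) : Int × Int × Int × Bool :=
  let (major, minor, patch, isFirst) := st
  if PySem.Str.strip commit = "" then (major, minor, patch, isFirst)
  else if isFirst then (major, minor, patch, false)
  else if svMajorKeywords.any (fun k => PySem.Str.isIn k (svLow commit)) then (major + 1, 0, 0, false)
  else if svMinorKeywords.any (fun k => PySem.Str.isIn k (svLow commit)) then (major, minor + 1, 0, false)
  else (major, minor, patch + 1, false)

def calculate_semver (commits : List String) (filepath : String) : String :=
  if commits = [] ∨ (commits.filter (fun c => PySem.Str.strip c ≠ "")).length = 0 then "1.0.0"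
  else
    let st := commits.reverse.foldl svStepA ((1 : Int), (0 : Int), (0 : Int), true)
    svFormat st.1 st.2.1 st.2.2.1

-- ===== PORT B =====
def svClassify (commit : String) : Char :=
  if svMajorKeywords.any (fun k => PySem.Str.isIn k (svLow commit)) then 'M'
  else if svMinorKeywords.any (fun k => PySem.Str.isIn k (svLow commit)) then 'm'
  else 'p'

-- after_last: walk from the right until the tag, collect, reverse back
def svAfterLast (tags : List Char) (tag : Char) : List Char :=
  (tags.reverse.takeWhile (fun t => t ≠ tag)).reverse

def calculate_semver_alt (commits : List String) (filepath : String) : String :=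
  let rel := commits.reverse.filter (fun c => PySem.Str.strip c ≠ "")
  if rel = [] then "1.0.0"
  else
    let cats := (rel.drop 1).map svClassify
    let major : Int := 1 + (cats.count 'M' : Int)
    let am := svAfterLast cats 'M'
    let minor : Int := (am.count 'm' : Int)
    let ap := svAfterLast am 'm'
    let patch : Int := (ap.count 'p' : Int)
    svFormat major minor patch

-- ===== PRECONDITION & SPEC =====
def Spec_calculate_semver (commits : List String) (filepath : String) (out : String) : Prop := out = calculate_semver_alt commits filepath
instance (commits : List String) (filepath : String) (out : String) : Decidable (Spec_calculate_semver commits filepath out) := by unfold Spec_calculate_semver; infer_instance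

-- ===== CLAIM (what is proved, stated in full; the proofs are below) =====
def Claim_equal_calculate_semver : Prop := ∀ (commits : List String) (filepath : String), Dom_calculate_semver commits filepath → Spec_calculate_semver commits filepath (calculate_semver commits filepath)

-- ===== LEMMAS AND PROOFS =====

-- the flag-free loop body on triples, driven by the classification tag
def svStep3 (st : Int × Int × Int) (t : Char) : Int × Int × Int :=
  if t = 'M' then (st.1 + 1, 0, 0)
  else if t = 'm' then (st.1, st.2.1 + 1, 0)
  else (st.1, st.2.1, st.2.2 + 1)

theorem svStepA_skip_blank (l : List String) (st : Int × Int × Int × Bool) :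
    l.foldl svStepA st = (l.filter (fun c => PySem.Str.strip c ≠ "")).foldl svStepA st := by
  induction l generalizing st with
  | nil => rfl
  | cons x xs ih =>
    by_cases h : PySem.Str.strip x = ""
    · simp [List.filter_cons, h, ih, svStepA]
    · simp [List.filter_cons, h, ih]

theorem svStepA_false (l : List String) (st : Int × Int × Int)
    (h : ∀ c ∈ l, PySem.Str.strip c ≠ "") :
    l.foldl svStepA (st.1, st.2.1, st.2.2, false)
      = ((l.foldl (fun s c => svStep3 s (svClassify c)) st).1,
         (l.foldl (fun s c => svStep3 s (svClassify c)) st).2.1,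
         (l.foldl (fun s c => svStep3 s (svClassify c)) st).2.2, false) := by
  induction l generalizing st with
  | nil => rfl
  | cons x xs ih =>
    have hx := h x (by simp)
    have hxs : ∀ c ∈ xs, PySem.Str.strip c ≠ "" := fun c hc => h c (by simp [hc])
    simp only [List.foldl_cons]
    rw [show svStepA (st.1, st.2.1, st.2.2, false) x
        = ((svStep3 st (svClassify x)).1, (svStep3 st (svClassify x)).2.1,
           (svStep3 st (svClassify x)).2.2, false) from by
      cases hM : svMajorKeywords.any (fun k => PySem.Str.isIn k (svLow x)) <;>
        cases hN : svMinorKeywords.any (fun k => PySem.Str.isIn k (svLow x)) <;>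
          (simp only [svStepA, svStep3, svClassify, hM, hN]; simp [hx])]
    exact ih _ hxs

theorem svAfterLast_snoc_self (l : List Char) (c : Char) :
    svAfterLast (l ++ [c]) c = [] := by
  simp [svAfterLast]

theorem svAfterLast_snoc_ne (l : List Char) (c d : Char) (h : d ≠ c) :
    svAfterLast (l ++ [d]) c = svAfterLast l c ++ [d] := by
  simp [svAfterLast, h]

theorem svClassify_mem (c : String) : svClassify c = 'M' ∨ svClassify c = 'm' ∨ svClassify c = 'p' := by
  unfold svClassify
  split_ifs <;> simp

theorem svStep3_invariant (cats : List Char)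
    (h : ∀ t ∈ cats, t = 'M' ∨ t = 'm' ∨ t = 'p') :
    cats.foldl svStep3 ((1 : Int), (0 : Int), (0 : Int))
      = (1 + (cats.count 'M' : Int),
         ((svAfterLast cats 'M').count 'm' : Int),
         ((svAfterLast (svAfterLast cats 'M') 'm').count 'p' : Int)) := by
  induction cats using List.reverseRecOn with
  | nil => simp [svAfterLast]
  | append_singleton l a ih =>
    have hl : ∀ t ∈ l, t = 'M' ∨ t = 'm' ∨ t = 'p' := fun t ht => h t (by simp [ht])
    have ha := h a (by simp)
    rw [List.foldl_append, List.foldl_cons, List.foldl_nil, ih hl]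
    rcases ha with ha | ha | ha
    · subst ha
      simp [svStep3, svAfterLast_snoc_self, List.count_append]
      omega
    · subst ha
      rw [svAfterLast_snoc_ne l 'M' 'm' (by decide), svAfterLast_snoc_self]
      simp [svStep3, List.count_append]
    · subst ha
      rw [svAfterLast_snoc_ne l 'M' 'p' (by decide),
          svAfterLast_snoc_ne (svAfterLast l 'M') 'm' 'p' (by decide)]
      simp [svStep3, List.count_append]

theorem sv_main (commits : List String) (filepath : String) :
    calculate_semver commits filepath = calculate_semver_alt commits filepath := by
  unfold calculate_semver calculate_semver_alt
  set rel := commits.reverse.filter (fun c => PySem.Str.strip c ≠ "") with hrel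
  have hfr : rel = (commits.filter (fun c => PySem.Str.strip c ≠ "")).reverse := by
    rw [hrel, List.filter_reverse]
  have hguard : (commits = [] ∨ (commits.filter (fun c => PySem.Str.strip c ≠ "")).length = 0)
      ↔ rel = [] := by
    rw [hfr, List.reverse_eq_nil_iff, List.length_eq_zero_iff]
    constructor
    · rintro (h | h)
      · simp [h]
      · exact h
    · intro h
      exact Or.inr h
  by_cases hr : rel = []
  · rw [if_pos (hguard.mpr hr), if_pos hr]
  · rw [if_neg (fun h => hr (hguard.mp h)), if_neg hr]
    rw [svStepA_skip_blank, ← hrel]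
    obtain ⟨x, xs, hx⟩ : ∃ x xs, rel = x :: xs :=
      match rel, hr with | y :: ys, _ => ⟨y, ys, rfl⟩
    have hxs_ne : ∀ c ∈ xs, PySem.Str.strip c ≠ "" := by
      intro c hc
      have : c ∈ rel := by rw [hx]; simp [hc]
      have := List.of_mem_filter this
      simpa using this
    rw [hx, List.foldl_cons]
    have hfirst : svStepA ((1 : Int), (0 : Int), (0 : Int), true) x
        = ((1 : Int), (0 : Int), (0 : Int), false) := by
      have hxne : PySem.Str.strip x ≠ "" := by
        have : x ∈ rel := by rw [hx]; simp
        have := List.of_mem_filter this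
        simpa using this
      simp [svStepA, hxne]
    rw [hfirst, svStepA_false xs ((1 : Int), (0 : Int), (0 : Int)) hxs_ne,
        ← List.foldl_map,
        svStep3_invariant (xs.map svClassify)
          (by intro t ht; simp only [List.mem_map] at ht
              obtain ⟨c, _, hc⟩ := ht; rw [← hc]; exact svClassify_mem c)]
    simp [hx]

-- ===== VERDICT (by name: the statement is the Claim_ definition above) =====
theorem calculate_semver_spec : Claim_equal_calculate_semver := by
  intro commits filepath _
  unfold Spec_calculate_semver
  exact sv_main commits filepath
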